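-- pv_equiv track=rewrite | github.com/mariuszpab/dark8 | dark8_mark01/commands/patch_ops.py | apply_unified_diff
-- ===== SOURCE A (Python) =====
-- def apply_unified_diff(original_lines, diff_lines):
--     """
--     Minimalny parser unified diff:
--     - ignoruje linie --- / +++
--     - obsługuje hunki @@ ... @@
--     - ' ' = linia kontekstowa
--     - '-' = usuń linię z oryginału
--     - '+' = dodaj linię do wyniku
--     """
--
--     result = []
--     orig_index = 0
--     i = 0
--     n = len(diff_lines)
--
--     while i < n:
--         line = diff_lines[i]
--
--         if line.startswith('---') or line.startswith('+++'):
--             i += 1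
--             continue
--
--         if line.startswith('@@'):
--             i += 1
--             while i < n and not diff_lines[i].startswith('@@') and not diff_lines[i].startswith('---') and not diff_lines[i].startswith('+++'):
--                 hline = diff_lines[i]
--                 if not hline:
--                     i += 1
--                     continue
--
--                 prefix = hline[0]
--                 content = hline[1:] + "\n"
--
--                 if prefix == ' ':
--                     if orig_index < len(original_lines):
--                         result.append(original_lines[orig_index])
--                         orig_index += 1
--                     else:
--                         result.append(content)
--
--                 elif prefix == '-':
--                     if orig_index < len(original_lines):
--                         orig_index += 1
--
--                 elif prefix == '+':
--                     result.append(content)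
--
--                 else:
--                     result.append(hline + "\n")
--
--                 i += 1
--         else:
--             i += 1
--
--     while orig_index < len(original_lines):
--         result.append(original_lines[orig_index])
--         orig_index += 1
--
--     return result
-- ===== SOURCE B (Python) =====
-- def apply_unified_diff(original_lines, diff_lines):
--     # Phase 1: one linear scan of the diff with an in_hunk flag, producing
--     # a flat list of (prefix, content) operations.
--     ops = []
--     in_hunk = False
--     for line in diff_lines:
--         if line.startswith('---') or line.startswith('+++'):
--             in_hunk = False
--         elif line.startswith('@@'):
--             in_hunk = True
--         elif in_hunk and line:
--             prefix = line[0]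
--             if prefix in (' ', '-', '+'):
--                 ops.append((prefix, line[1:] + "\n"))
--             else:
--                 ops.append((prefix, line + "\n"))
--     # Phase 2: apply the operations against the original lines.
--     result = []
--     orig_index = 0
--     for prefix, content in ops:
--         if prefix == ' ':
--             if orig_index < len(original_lines):
--                 result.append(original_lines[orig_index])
--                 orig_index += 1
--             else:
--                 result.append(content)
--         elif prefix == '-':
--             if orig_index < len(original_lines):
--                 orig_index += 1
--         else:  # '+' and any unknown prefix: append the content
--             result.append(content)
--     result.extend(original_lines[orig_index:])
--     return result
-- ===== Notes on version B (the rewrite author's own statement) =====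
-- stated objective: alternative
-- what changed: Replaces A's nested index-driven while-loops with a two-phase pipeline: one flat scan of the diff with an in_hunk flag building a list of (prefix, content) operations, then a second loop applying that operation list to the original lines.
import Mathlib
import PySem

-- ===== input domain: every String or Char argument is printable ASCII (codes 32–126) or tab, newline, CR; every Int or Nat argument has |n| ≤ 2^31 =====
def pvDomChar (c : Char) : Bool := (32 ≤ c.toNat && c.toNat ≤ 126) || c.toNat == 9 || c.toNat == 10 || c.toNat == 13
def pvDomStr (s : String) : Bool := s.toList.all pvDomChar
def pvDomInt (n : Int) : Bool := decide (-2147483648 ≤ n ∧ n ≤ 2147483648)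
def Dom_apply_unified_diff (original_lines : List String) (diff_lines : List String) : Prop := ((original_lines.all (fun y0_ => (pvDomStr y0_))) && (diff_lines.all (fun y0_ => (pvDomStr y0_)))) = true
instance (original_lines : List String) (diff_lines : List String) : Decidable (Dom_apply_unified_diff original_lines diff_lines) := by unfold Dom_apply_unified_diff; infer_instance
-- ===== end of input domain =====

-- B replaces A's nested index-driven while-loops by a two-phase pipeline (scan the diff
-- into an operation list, then apply it); same cost, different decomposition ("alternative").

-- ===== PORT A =====
-- A's inner `while` (consuming hunk lines until the next '@@'/'---'/'+++'): recursion over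
-- the remaining diff lines (A advances i by one each step, so the suffix is the loop state);
-- returns the unconsumed suffix together with (result, orig_index).
def pvInnerA (orig : List String) : List String → List String → Nat → List String × List String × Nat
  | [], res, oi => ([], res, oi)
  | l :: rest, res, oi =>
    if PySem.Str.startswith l "@@" || PySem.Str.startswith l "---" || PySem.Str.startswith l "+++" then
      (l :: rest, res, oi)
    else if l = "" then
      pvInnerA orig rest res oi
    else
      -- hline[0] / hline[1:] on a non-empty line; the `none` arm is unreachable (l ≠ "")
      match PySem.Str.pyGet? l 0 with
      | none => pvInnerA orig rest res oi
      | some p =>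
        if p = ' ' then
          if oi < orig.length then pvInnerA orig rest (res ++ [orig.getD oi ""]) (oi + 1)
          else pvInnerA orig rest (res ++ [PySem.Str.slice l (some 1) none ++ "\n"]) oi
        else if p = '-' then
          if oi < orig.length then pvInnerA orig rest res (oi + 1)
          else pvInnerA orig rest res oi
        else if p = '+' then
          pvInnerA orig rest (res ++ [PySem.Str.slice l (some 1) none ++ "\n"]) oi
        else
          pvInnerA orig rest (res ++ [l ++ "\n"]) oi

-- needed for outer-loop termination: the inner loop only consumes diff lines
theorem pvInnerA_fst_le (orig : List String) : ∀ (ds res : List String) (oi : Nat),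
    (pvInnerA orig ds res oi).1.length ≤ ds.length := by
  intro ds
  induction ds with
  | nil => intro res oi; simp [pvInnerA]
  | cons l rest ih =>
    intro res oi
    simp only [pvInnerA]
    split
    · simp
    · split
      · exact le_trans (ih _ _) (by simp)
      · split
        · exact le_trans (ih _ _) (by simp)
        · split_ifs <;> exact le_trans (ih _ _) (by simp)

-- A's outer `while i < n` loop, again as recursion over the remaining diff lines.
def pvOuterA (orig : List String) : List String → List String → Nat → List String × Nat
  | [], res, oi => (res, oi)
  | l :: rest, res, oi =>
    if PySem.Str.startswith l "---" || PySem.Str.startswith l "+++" then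
      pvOuterA orig rest res oi
    else if PySem.Str.startswith l "@@" then
      let t := pvInnerA orig rest res oi
      pvOuterA orig t.1 t.2.1 t.2.2
    else
      pvOuterA orig rest res oi
  termination_by ds _ _ => ds.length
  decreasing_by
  all_goals first
  | exact Nat.lt_succ_of_le (pvInnerA_fst_le orig _ _ _)
  | (simp; try omega)

-- A's trailing `while orig_index < len(original_lines)` loop
def pvTailA (orig : List String) (oi : Nat) (res : List String) : List String :=
  if oi < orig.length then pvTailA orig (oi + 1) (res ++ [orig.getD oi ""]) else res
  termination_by orig.length - oi

def apply_unified_diff (original_lines : List String) (diff_lines : List String) : List String :=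
  let t := pvOuterA original_lines diff_lines [] 0
  pvTailA original_lines t.2 t.1

-- ===== PORT B =====
-- Phase 1 of Source B: one scan over the diff with the in_hunk flag, building the operation list.
def pvDiffOps : List String → Bool → List (Char × String)
  | [], _ => []
  | l :: rest, inHunk =>
    if PySem.Str.startswith l "---" || PySem.Str.startswith l "+++" then
      pvDiffOps rest false
    else if PySem.Str.startswith l "@@" then
      pvDiffOps rest true
    else if inHunk && !(l = "") then
      match PySem.Str.pyGet? l 0 with
      | none => pvDiffOps rest inHunk  -- unreachable (l ≠ "")
      | some p =>
        (p, if p = ' ' || p = '-' || p = '+' then PySem.Str.slice l (some 1) none ++ "\n"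
            else l ++ "\n") :: pvDiffOps rest inHunk
    else
      pvDiffOps rest inHunk

-- Phase 2 of Source B: apply the operation list; the trailing extend(original_lines[orig_index:])
-- (a slice with a nonnegative start = drop, exact) is the base case.
def pvApplyOps (orig : List String) : List (Char × String) → List String → Nat → List String
  | [], res, oi => res ++ orig.drop oi
  | (p, c) :: ops, res, oi =>
    if p = ' ' then
      if oi < orig.length then pvApplyOps orig ops (res ++ [orig.getD oi ""]) (oi + 1)
      else pvApplyOps orig ops (res ++ [c]) oi
    else if p = '-' then
      if oi < orig.length then pvApplyOps orig ops res (oi + 1)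
      else pvApplyOps orig ops res oi
    else
      pvApplyOps orig ops (res ++ [c]) oi

def apply_unified_diff_alt (original_lines : List String) (diff_lines : List String) : List String :=
  pvApplyOps original_lines (pvDiffOps diff_lines false) [] 0

-- ===== PRECONDITION & SPEC =====
def Spec_apply_unified_diff (original_lines : List String) (diff_lines : List String) (out : List String) : Prop := out = apply_unified_diff_alt original_lines diff_lines
instance (original_lines : List String) (diff_lines : List String) (out : List String) : Decidable (Spec_apply_unified_diff original_lines diff_lines out) := by unfold Spec_apply_unified_diff; infer_instance

-- ===== CLAIM (what is proved, stated in full; the proofs are below) =====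
def Claim_equal_apply_unified_diff : Prop := ∀ (original_lines : List String) (diff_lines : List String), Dom_apply_unified_diff original_lines diff_lines → Spec_apply_unified_diff original_lines diff_lines (apply_unified_diff original_lines diff_lines)

-- ===== LEMMAS AND PROOFS =====

-- running A's outer loop to the end (including the trailing copy loop)
def pvRunA (orig ds res : List String) (oi : Nat) : List String :=
  let t := pvOuterA orig ds res oi
  pvTailA orig t.2 t.1

-- A's state after entering a hunk: inner loop first, then the outer loop on what remains
def pvRunAI (orig ds res : List String) (oi : Nat) : List String :=
  let t := pvInnerA orig ds res oi
  pvRunA orig t.1 t.2.1 t.2.2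

theorem pvTailA_eq_drop (orig : List String) : ∀ (oi : Nat) (res : List String),
    pvTailA orig oi res = res ++ orig.drop oi := by
  intro oi
  induction' h : orig.length - oi with k ih generalizing oi
  · intro res
    rw [pvTailA]
    have hge : orig.length ≤ oi := by omega
    rw [if_neg (by omega), List.drop_eq_nil_of_le hge, List.append_nil]
  · intro res
    rw [pvTailA]
    have hlt : oi < orig.length := by omega
    have := ih (oi + 1) (by omega) (res ++ [orig.getD oi ""])
    simp only [hlt, if_pos, this]
    rw [List.append_assoc]
    congr 1
    rw [List.getD_eq_getElem _ _ hlt, List.drop_eq_getElem_cons hlt]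
    simp

-- one outer-loop step of A, phrased on the fully-run loops
theorem pvRunA_cons (orig : List String) (l : String) (rest res : List String) (oi : Nat) :
    pvRunA orig (l :: rest) res oi =
      if PySem.Str.startswith l "---" || PySem.Str.startswith l "+++" then pvRunA orig rest res oi
      else if PySem.Str.startswith l "@@" then pvRunAI orig rest res oi
      else pvRunA orig rest res oi := by
  simp only [pvRunA, pvRunAI, pvOuterA]
  split_ifs <;> rfl

-- the key simulation: A's nested loops compute exactly B's two-phase pipeline,
-- both from outside a hunk (pvDiffOps … false) and from inside one (pvDiffOps … true)
theorem pvMain (orig : List String) : ∀ (n : Nat) (ds : List String), ds.length < n →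
    ∀ (res : List String) (oi : Nat),
      pvRunA orig ds res oi = pvApplyOps orig (pvDiffOps ds false) res oi ∧
      pvRunAI orig ds res oi = pvApplyOps orig (pvDiffOps ds true) res oi := by
  intro n
  induction n with
  | zero => intro ds h; omega
  | succ n ih =>
    intro ds hlen res oi
    match ds with
    | [] =>
      constructor
      · simp [pvRunA, pvOuterA, pvDiffOps, pvApplyOps, pvTailA_eq_drop]
      · simp [pvRunAI, pvInnerA, pvRunA, pvOuterA, pvDiffOps, pvApplyOps, pvTailA_eq_drop]
    | l :: rest =>
      have hr : rest.length < n := by simpa using hlen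
      have IH1 := fun res oi => (ih rest hr res oi).1
      have IH2 := fun res oi => (ih rest hr res oi).2
      cases h1 : (PySem.Str.startswith l "---" || PySem.Str.startswith l "+++") with
      | true =>
        -- file header line: both loops leave the hunk / skip it
        constructor
        · rw [pvRunA_cons, if_pos h1, pvDiffOps, if_pos h1]
          exact IH1 res oi
        · rw [pvRunAI, pvInnerA]
          have g1 : ((PySem.Str.startswith l "@@" || PySem.Str.startswith l "---") || PySem.Str.startswith l "+++") = true := by
            rcases Bool.or_eq_true_iff.mp h1 with h | h
            · exact Bool.or_eq_true_iff.mpr (Or.inl (Bool.or_eq_true_iff.mpr (Or.inr h)))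
            · exact Bool.or_eq_true_iff.mpr (Or.inr h)
          rw [if_pos g1]
          show pvRunA orig (l :: rest) res oi = _
          rw [pvRunA_cons, if_pos h1, pvDiffOps, if_pos h1]
          exact IH1 res oi
      | false =>
        cases h2 : PySem.Str.startswith l "@@" with
        | true =>
          -- '@@': enter (or re-enter) a hunk
          constructor
          · rw [pvRunA_cons, if_neg (by rw [h1]; simp), if_pos h2]
            rw [pvDiffOps, if_neg (by rw [h1]; simp), if_pos h2, IH2]
          · rw [pvRunAI, pvInnerA, if_pos (show ((PySem.Str.startswith l "@@" || PySem.Str.startswith l "---") || PySem.Str.startswith l "+++") = true from Bool.or_eq_true_iff.mpr (Or.inl (Bool.or_eq_true_iff.mpr (Or.inl h2))))]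
            show pvRunA orig (l :: rest) res oi = _
            rw [pvRunA_cons, if_neg (by rw [h1]; simp), if_pos h2]
            rw [pvDiffOps, if_neg (by rw [h1]; simp), if_pos h2, IH2]
        | false =>
          have hor := Bool.or_eq_false_iff.mp h1
          have hg : ((PySem.Str.startswith l "@@" || PySem.Str.startswith l "---") || PySem.Str.startswith l "+++") = false :=
            Bool.or_eq_false_iff.mpr ⟨Bool.or_eq_false_iff.mpr ⟨h2, hor.1⟩, hor.2⟩
          have h1n : ¬((PySem.Str.startswith l "---" || PySem.Str.startswith l "+++") = true) := by
            rw [h1]; exact Bool.false_ne_true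
          have h2n : ¬(PySem.Str.startswith l "@@" = true) := by
            rw [h2]; exact Bool.false_ne_true
          have hgn : ¬(((PySem.Str.startswith l "@@" || PySem.Str.startswith l "---") || PySem.Str.startswith l "+++") = true) := by
            rw [hg]; exact Bool.false_ne_true
          constructor
          · -- outside a hunk: line ignored by both sides
            rw [pvRunA_cons, if_neg h1n, if_neg h2n]
            rw [pvDiffOps, if_neg h1n, if_neg h2n,
                if_neg (show ¬((false && !(l = "" : Bool)) = true) by simp)]
            exact IH1 res oi
          · -- a hunk body line
            rw [pvRunAI, pvInnerA, if_neg hgn]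
            rw [pvDiffOps, if_neg h1n, if_neg h2n]
            by_cases hemp : l = ""
            · rw [if_pos hemp, if_neg (show ¬((true && !(l = "" : Bool)) = true) by simp [hemp])]
              exact IH2 res oi
            · rw [if_neg hemp, if_pos (show (true && !(l = "" : Bool)) = true by simp [hemp])]
              split
              · exact IH2 res oi
              · rename_i p hp
                rw [pvApplyOps]
                by_cases hsp : p = ' '
                · subst hsp
                  by_cases hoi : oi < orig.length
                  · simpa [pvRunAI, hoi] using IH2 (res ++ [orig.getD oi ""]) (oi + 1)
                  · simpa [pvRunAI, hoi] using IH2 (res ++ [PySem.Str.slice l (some 1) none ++ "\n"]) oi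
                · by_cases hmp : p = '-'
                  · subst hmp
                    by_cases hoi : oi < orig.length
                    · simpa [pvRunAI, hoi] using IH2 res (oi + 1)
                    · simpa [pvRunAI, hoi] using IH2 res oi
                  · by_cases hpp : p = '+'
                    · subst hpp
                      simpa [pvRunAI] using IH2 (res ++ [PySem.Str.slice l (some 1) none ++ "\n"]) oi
                    · simpa [pvRunAI, hsp, hmp, hpp] using IH2 (res ++ [l ++ "\n"]) oi

-- ===== VERDICT (by name: the statement is the Claim_ definition above) =====
theorem apply_unified_diff_spec : Claim_equal_apply_unified_diff := by
  intro original_lines diff_lines _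
  show apply_unified_diff original_lines diff_lines = apply_unified_diff_alt original_lines diff_lines
  have := (pvMain original_lines (diff_lines.length + 1) diff_lines (by omega) [] 0).1
  simpa [pvRunA, apply_unified_diff, apply_unified_diff_alt] using this
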